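-- pv_equiv track=rewrite | github.com/spacearya/KingstonAssist | backend/router.py | split_place_entries
-- ===== SOURCE A (Python) =====
-- from typing import Dict, List, Tuple, Optional
--
-- def split_place_entries(content: str) -> List[str]:
--     """Split places file content into individual entries"""
--     entries = []
--     current_entry = []
--     lines = content.split('\n')
--
--     for line in lines:
--         if line.startswith("Place Name:") and current_entry:
--             # Save previous entry
--             entries.append('\n'.join(current_entry))
--             current_entry = [line]
--         else:
--             current_entry.append(line)
--
--     if current_entry:
--         entries.append('\n'.join(current_entry))
--
--     return [e.strip() for e in entries if e.strip() and not e.startswith("KINGSTON") and not e.startswith("===")]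
-- ===== SOURCE B (Python) =====
-- def split_place_entries(content: str):
--     """Split places file content into individual entries (two-pointer scan, filter fused)."""
--     lines = content.split('\n')
--     n = len(lines)
--     out = []
--     i = 0
--     while i < n:
--         j = i + 1
--         while j < n and not lines[j].startswith("Place Name:"):
--             j += 1
--         e = '\n'.join(lines[i:j])
--         s = e.strip()
--         if s and not e.startswith("KINGSTON") and not e.startswith("==="):
--             out.append(s)
--         i = j
--     return out
-- ===== Notes on version B (the rewrite author's own statement) =====
-- stated objective: alternative
-- what changed: Replaces the stateful flush-on-boundary accumulator (build all entries, then a separate filter/strip comprehension) with a single two-pointer scan that finds the next 'Place Name:' boundary, slices the lines between the pointers, and filters/strips each entry as it is emitted.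
import Mathlib
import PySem

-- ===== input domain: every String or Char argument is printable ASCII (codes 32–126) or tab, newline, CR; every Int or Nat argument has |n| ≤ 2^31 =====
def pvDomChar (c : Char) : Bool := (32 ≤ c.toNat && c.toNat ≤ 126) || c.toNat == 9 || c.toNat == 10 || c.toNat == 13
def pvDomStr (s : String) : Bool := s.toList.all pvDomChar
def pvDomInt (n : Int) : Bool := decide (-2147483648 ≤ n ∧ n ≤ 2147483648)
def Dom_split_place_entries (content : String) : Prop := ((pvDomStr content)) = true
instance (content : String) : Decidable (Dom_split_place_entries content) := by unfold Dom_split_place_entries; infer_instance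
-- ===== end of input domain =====

-- B replaces A's flush-on-boundary accumulator + trailing filter pass by a two-pointer scan that
-- slices each entry between consecutive 'Place Name:' boundaries and filters it as it is emitted
-- (alternative decomposition, same cost).

-- shared tiny predicates (identical expressions in both Pythons)
def pvIsB (line : String) : Bool := PySem.Str.startswith line "Place Name:"
def pvKeep (e : String) : Bool :=
  !(PySem.Str.strip e == "") && !(PySem.Str.startswith e "KINGSTON") && !(PySem.Str.startswith e "===")

-- ===== PORT A =====
def split_place_entries (content : String) : List String :=
  let lines := (PySem.Str.split? content "\n").getD []
  let st := lines.foldl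
    (fun (st : List String × List String) line =>
      if pvIsB line && !st.2.isEmpty then
        (st.1 ++ [PySem.Str.join "\n" st.2], [line])
      else
        (st.1, st.2 ++ [line]))
    ([], [])
  let entries := if st.2.isEmpty then st.1 else st.1 ++ [PySem.Str.join "\n" st.2]
  (entries.filter pvKeep).map PySem.Str.strip

-- ===== PORT B =====
-- inner while loop of Source B: advance j to the next boundary line (or n)
def pvFindNext (lines : List String) (n j : Nat) : Nat :=
  if j < n then
    if !pvIsB (lines.getD j "") then pvFindNext lines n (j + 1) else j
  else j
termination_by n - j

theorem pvFindNext_ge (lines : List String) (n j : Nat) : j ≤ pvFindNext lines n j := by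
  fun_induction pvFindNext with
  | case1 => omega
  | case2 => omega
  | case3 => omega

-- outer while loop of Source B
def pvOuter (lines : List String) (n i : Nat) : List String :=
  if i < n then
    -- j = next boundary; e = '\n'.join(lines[i:j]); s = e.strip(); then the fused filter/append
    if pvKeep (PySem.Str.join "\n"
        (PySem.List.slice lines (some (i : Int)) (some ((pvFindNext lines n (i + 1) : Nat) : Int)))) then
      PySem.Str.strip (PySem.Str.join "\n"
        (PySem.List.slice lines (some (i : Int)) (some ((pvFindNext lines n (i + 1) : Nat) : Int))))
        :: pvOuter lines n (pvFindNext lines n (i + 1))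
    else pvOuter lines n (pvFindNext lines n (i + 1))
  else []
termination_by n - i
decreasing_by
  all_goals (have := pvFindNext_ge lines n (i + 1); omega)

def split_place_entries_alt (content : String) : List String :=
  let lines := (PySem.Str.split? content "\n").getD []
  pvOuter lines lines.length 0

-- ===== PRECONDITION & SPEC =====
def Spec_split_place_entries (content : String) (out : List String) : Prop := out = split_place_entries_alt content
instance (content : String) (out : List String) : Decidable (Spec_split_place_entries content out) := by unfold Spec_split_place_entries; infer_instance

-- ===== CLAIM (what is proved, stated in full; the proofs are below) =====
def Claim_equal_split_place_entries : Prop := ∀ (content : String), Dom_split_place_entries content → Spec_split_place_entries content (split_place_entries content)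

-- ===== LEMMAS AND PROOFS =====

-- A's loop body and finalisation, named for the proofs (definitionally the port's inline code)
def pvStepA (st : List String × List String) (line : String) : List String × List String :=
  if pvIsB line && !st.2.isEmpty then
    (st.1 ++ [PySem.Str.join "\n" st.2], [line])
  else
    (st.1, st.2 ++ [line])

def pvFin (st : List String × List String) : List String :=
  if st.2.isEmpty then st.1 else st.1 ++ [PySem.Str.join "\n" st.2]

-- the raw entries A's loop produces starting from a (nonempty) current chunk `cur`
def pvProcA (cur : List String) : List String → List String
  | [] => [PySem.Str.join "\n" cur]
  | l :: ls =>
    if pvIsB l then PySem.Str.join "\n" cur :: pvProcA [l] ls else pvProcA (cur ++ [l]) ls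

-- B's chunking described structurally on the list of lines
def pvProcB : List String → List String
  | [] => []
  | l :: ls =>
    let e := PySem.Str.join "\n" (l :: ls.takeWhile (fun x => !pvIsB x))
    let rest := pvProcB (ls.dropWhile (fun x => !pvIsB x))
    if pvKeep e then PySem.Str.strip e :: rest else rest
termination_by xs => xs.length
decreasing_by
  simp only [List.length_cons]
  exact Nat.lt_succ_of_le (List.length_dropWhile_le _ _)

def pvEmit (e : String) : List String := if pvKeep e then [PySem.Str.strip e] else []

theorem pvProcB_nil : pvProcB [] = [] := by rw [pvProcB.eq_def]

theorem pvProcB_cons (l : String) (ls : List String) :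
    pvProcB (l :: ls) =
      pvEmit (PySem.Str.join "\n" (l :: ls.takeWhile (fun x => !pvIsB x))) ++
        pvProcB (ls.dropWhile (fun x => !pvIsB x)) := by
  rw [pvProcB.eq_def]
  simp only [pvEmit]
  split <;> simp

-- A's foldl invariant
theorem pvLoopA (lines : List String) :
    ∀ (entries cur : List String), cur ≠ [] →
    pvFin (lines.foldl pvStepA (entries, cur)) = entries ++ pvProcA cur lines := by
  induction lines with
  | nil =>
    intro entries cur hcur
    simp only [List.foldl_nil, pvProcA, pvFin]
    rw [if_neg (by simpa using hcur)]
  | cons l ls ih =>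
    intro entries cur hcur
    simp only [List.foldl_cons]
    by_cases hb : pvIsB l
    · have hs : pvStepA (entries, cur) l = (entries ++ [PySem.Str.join "\n" cur], [l]) := by
        simp [pvStepA, hb, hcur]
      rw [hs, ih _ [l] (by simp)]
      simp [pvProcA, hb]
    · have hs : pvStepA (entries, cur) l = (entries, cur ++ [l]) := by
        simp [pvStepA, hb]
      rw [hs, ih entries (cur ++ [l]) (by simp)]
      simp [pvProcA, hb]

theorem pvFilterMap_eq_flatMap (xs : List String) :
    (xs.filter pvKeep).map PySem.Str.strip = xs.flatMap pvEmit := by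
  induction xs with
  | nil => rfl
  | cons x xs ih =>
    simp only [List.flatMap_cons, pvEmit, List.filter_cons]
    by_cases h : pvKeep x
    · simp [h, ih]
    · simp [h, ih]

-- emitting-while-filtering over B's chunks equals filter∘map over A's raw entries
theorem pvBridge (ls : List String) :
    ∀ (cur : List String),
    (pvProcA cur ls).flatMap pvEmit =
      (pvEmit (PySem.Str.join "\n" (cur ++ ls.takeWhile (fun x => !pvIsB x)))) ++
        pvProcB (ls.dropWhile (fun x => !pvIsB x)) := by
  induction ls with
  | nil => intro cur; simp [pvProcA, pvProcB]
  | cons l ls ih =>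
    intro cur
    by_cases hb : pvIsB l
    · rw [show pvProcA cur (l :: ls) = PySem.Str.join "\n" cur :: pvProcA [l] ls from by
        simp [pvProcA, hb]]
      rw [List.flatMap_cons, ih [l], List.takeWhile_cons, List.dropWhile_cons]
      simp [hb, pvProcB_cons]
    · rw [show pvProcA cur (l :: ls) = pvProcA (cur ++ [l]) ls from by simp [pvProcA, hb]]
      rw [ih (cur ++ [l]), List.takeWhile_cons, List.dropWhile_cons]
      simp [hb]

theorem pvFlatMap_procA_eq_procB (l : String) (ls : List String) :
    (pvProcA [l] ls).flatMap pvEmit = pvProcB (l :: ls) := by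
  rw [pvBridge ls [l], pvProcB_cons]
  simp

-- characterisation of the inner while loop
theorem pvFindNext_eq (lines : List String) :
    ∀ (m j : Nat), lines.length - j ≤ m → j ≤ lines.length →
    pvFindNext lines lines.length j = j + ((lines.drop j).takeWhile (fun x => !pvIsB x)).length := by
  intro m
  induction m with
  | zero =>
    intro j hm hj
    have hj' : j = lines.length := by omega
    rw [pvFindNext]
    simp [hj', List.drop_length]
  | succ m ih =>
    intro j hm hj
    rw [pvFindNext]
    by_cases h : j < lines.length
    · rw [if_pos h]
      have hdrop : lines.drop j = lines[j] :: lines.drop (j + 1) :=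
        List.drop_eq_getElem_cons h
      have hget : lines.getD j "" = lines[j] := List.getD_eq_getElem _ _ h
      rw [hget, hdrop]
      cases hb : pvIsB lines[j] with
      | true => simp [hb]
      | false =>
        simp only [Bool.not_false, if_true]
        rw [ih (j + 1) (by omega) (by omega)]
        rw [List.takeWhile_cons]
        simp only [hb, Bool.not_false, if_true, List.length_cons]
        omega
    · rw [if_neg h]
      have hj' : j = lines.length := by omega
      simp [hj', List.drop_length]

-- the outer loop computes pvProcB of the remaining lines
theorem pvOuter_eq (lines : List String) :
    ∀ (m i : Nat), lines.length - i ≤ m →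
    pvOuter lines lines.length i = pvProcB (lines.drop i) := by
  intro m
  induction m with
  | zero =>
    intro i hm
    rw [pvOuter]
    have h : ¬ i < lines.length := by omega
    rw [if_neg h, List.drop_eq_nil_of_le (by omega), pvProcB_nil]
  | succ m ih =>
    intro i hm
    rw [pvOuter]
    by_cases h : i < lines.length
    · rw [if_pos h]
      have hjdef : pvFindNext lines lines.length (i + 1) =
          (i + 1) + ((lines.drop (i + 1)).takeWhile (fun x => !pvIsB x)).length :=
        pvFindNext_eq lines (lines.length) (i + 1) (by omega) (by omega)
      have hdropi : lines.drop i = lines[i] :: lines.drop (i + 1) :=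
        List.drop_eq_getElem_cons h
      have hsplit := List.takeWhile_append_dropWhile (p := fun x => !pvIsB x) (l := lines.drop (i + 1))
      have htake : (lines.drop (i + 1)).take ((lines.drop (i + 1)).takeWhile (fun x => !pvIsB x)).length
          = (lines.drop (i + 1)).takeWhile (fun x => !pvIsB x) := by
        have h1 := List.take_left (l₁ := (lines.drop (i + 1)).takeWhile (fun x => !pvIsB x))
          (l₂ := (lines.drop (i + 1)).dropWhile (fun x => !pvIsB x))
        rwa [hsplit] at h1
      have hdropw : (lines.drop (i + 1)).drop ((lines.drop (i + 1)).takeWhile (fun x => !pvIsB x)).length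
          = (lines.drop (i + 1)).dropWhile (fun x => !pvIsB x) := by
        have h1 := List.drop_left (l₁ := (lines.drop (i + 1)).takeWhile (fun x => !pvIsB x))
          (l₂ := (lines.drop (i + 1)).dropWhile (fun x => !pvIsB x))
        rwa [hsplit] at h1
      have hslice : PySem.List.slice lines (some (i : Int))
            (some ((pvFindNext lines lines.length (i + 1) : Nat) : Int))
          = lines[i] :: (lines.drop (i + 1)).takeWhile (fun x => !pvIsB x) := by
        rw [PySem.List.slice_natCast, hdropi]
        have hd : pvFindNext lines lines.length (i + 1) - i
            = ((lines.drop (i + 1)).takeWhile (fun x => !pvIsB x)).length + 1 := by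
          rw [hjdef]; omega
        rw [hd, List.take_succ_cons, htake]
      have hdropj : lines.drop (pvFindNext lines lines.length (i + 1))
          = (lines.drop (i + 1)).dropWhile (fun x => !pvIsB x) := by
        rw [← hdropw, List.drop_drop, hjdef]
      rw [hslice]
      rw [ih (pvFindNext lines lines.length (i + 1)) (by rw [hjdef]; omega)]
      rw [hdropj, hdropi, pvProcB_cons]
      simp only [pvEmit]
      split <;> simp
    · rw [if_neg h, List.drop_eq_nil_of_le (by omega), pvProcB_nil]

-- ===== VERDICT (by name: the statement is the Claim_ definition above) =====
theorem split_place_entries_spec : Claim_equal_split_place_entries := by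
  intro content _
  show split_place_entries content = split_place_entries_alt content
  unfold split_place_entries split_place_entries_alt
  show ((pvFin (((PySem.Str.split? content "\n").getD []).foldl pvStepA ([], []))).filter pvKeep).map
        PySem.Str.strip
      = pvOuter ((PySem.Str.split? content "\n").getD [])
          ((PySem.Str.split? content "\n").getD []).length 0
  set L := (PySem.Str.split? content "\n").getD [] with hL
  rw [pvOuter_eq L L.length 0 (by omega), List.drop_zero]
  cases L with
  | nil => simp [pvFin, pvProcB_nil]
  | cons l ls =>
    have hstep : pvStepA ([], []) l = ([], [l]) := by simp [pvStepA]
    rw [List.foldl_cons, hstep, pvLoopA ls [] [l] (by simp), List.nil_append,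
      pvFilterMap_eq_flatMap, pvFlatMap_procA_eq_procB]
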